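-- pv_equiv track=rewrite | github.com/takito1812/adx-query | adx_query.py | _expand_attributes
-- ===== SOURCE A (Python) =====
-- from typing import List, Optional, Sequence
--
-- def _expand_attributes(values: Optional[Sequence[str]]) -> Optional[List[str]]:
--     if not values:
--         return None
--     attrs: List[str] = []
--     for item in values:
--         for part in item.split(","):
--             part = part.strip()
--             if part:
--                 attrs.append(part)
--     return attrs or None
-- ===== SOURCE B (Python) =====
-- from typing import List, Optional, Sequence
--
-- def _expand_attributes(values: Optional[Sequence[str]]) -> Optional[List[str]]:
--     if not values:
--         return None
--     attrs: List[str] = []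
--     for item in values:
--         buf: List[str] = []          # characters of the token being scanned
--         for ch in item + ",":        # sentinel comma flushes the last token
--             if ch == ",":
--                 while buf and buf[0].isspace():
--                     buf.pop(0)
--                 while buf and buf[-1].isspace():
--                     buf.pop()
--                 if buf:
--                     attrs.append("".join(buf))
--                 buf = []
--             else:
--                 buf.append(ch)
--     return attrs or None
-- ===== Notes on version B (the rewrite author's own statement) =====
-- stated objective: alternative
-- what changed: Replaces A's split/strip/filter passes with a character-level state machine: one scan over each item's characters (with a sentinel comma) that builds a token buffer and, on each comma, trims whitespace off the buffer's ends by popping and flushes it if non-empty.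
import Mathlib
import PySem

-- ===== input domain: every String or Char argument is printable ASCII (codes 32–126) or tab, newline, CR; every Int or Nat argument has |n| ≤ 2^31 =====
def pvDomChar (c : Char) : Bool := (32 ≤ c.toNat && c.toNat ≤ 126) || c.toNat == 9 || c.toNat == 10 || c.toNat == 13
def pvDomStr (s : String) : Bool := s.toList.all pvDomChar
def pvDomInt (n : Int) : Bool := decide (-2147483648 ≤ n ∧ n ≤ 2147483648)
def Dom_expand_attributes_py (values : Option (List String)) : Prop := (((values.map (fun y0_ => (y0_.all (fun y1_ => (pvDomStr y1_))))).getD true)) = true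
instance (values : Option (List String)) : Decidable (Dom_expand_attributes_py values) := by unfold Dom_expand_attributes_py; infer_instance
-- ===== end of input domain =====

-- B replaces A's split/strip/filter passes with a character-level state machine over each
-- item's characters (sentinel comma flushes; whitespace popped off the buffer ends at flush);
-- same return value, no speed claim.

-- ===== PORT A =====
-- nested loops: for item in values: for part in item.split(","): strip, keep non-empty
def expand_attributes_py (values : Option (List String)) : Option (List String) :=
  match values with
  | none => none
  | some vs =>
    if vs.isEmpty then none
    else
      let attrs := vs.foldl (fun attrs item =>
        (PySem.Chars.splitOn item.toList [',']).foldl (fun attrs part =>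
          let part := PySem.Chars.strip part
          if ¬ part.isEmpty then attrs ++ [String.ofList part] else attrs) attrs) []
      if attrs.isEmpty then none else some attrs

-- ===== PORT B =====
-- flush on comma: the two Python while-pop loops remove leading/trailing whitespace chars
-- from the buffer (ported as dropWhile on each end, exactly those loops' effect), then the
-- buffer is appended if non-empty
def pvFlush (attrs : List String) (buf : List Char) : List String :=
  let buf := buf.dropWhile PySem.Chars.isspace
  let buf := (buf.reverse.dropWhile PySem.Chars.isspace).reverse
  if ¬ buf.isEmpty then attrs ++ [String.ofList buf] else attrs

-- one character of the scan: comma flushes the buffer, anything else is appended to it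
def pvStep (st : List String × List Char) (c : Char) : List String × List Char :=
  if c = ',' then (pvFlush st.1 st.2, []) else (st.1, st.2 ++ [c])

def expand_attributes_py_alt (values : Option (List String)) : Option (List String) :=
  match values with
  | none => none
  | some vs =>
    if vs.isEmpty then none
    else
      let attrs := vs.foldl (fun attrs item =>
        ((item.toList ++ [',']).foldl pvStep (attrs, [])).1) []
      if attrs.isEmpty then none else some attrs

-- ===== PRECONDITION & SPEC =====
def Spec_expand_attributes_py (values : Option (List String)) (out : Option (List String)) : Prop := out = expand_attributes_py_alt values
instance (values : Option (List String)) (out : Option (List String)) : Decidable (Spec_expand_attributes_py values out) := by unfold Spec_expand_attributes_py; infer_instance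

-- ===== CLAIM (what is proved, stated in full; the proofs are below) =====
def Claim_equal_expand_attributes_py : Prop := ∀ (values : Option (List String)), Dom_expand_attributes_py values → Spec_expand_attributes_py values (expand_attributes_py values)

-- ===== LEMMAS AND PROOFS =====

-- structural model of PySem.Chars.splitOn s [','] (fuel-free)
def pvModel : List Char → List Char → List (List Char)
  | [], cur => [cur.reverse]
  | c :: rest, cur => if c = ',' then cur.reverse :: pvModel rest [] else pvModel rest (c :: cur)

theorem pvGo_eq (fuel : Nat) : ∀ (s cur : List Char) (acc : List (List Char)),
    s.length ≤ fuel →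
    PySem.Chars.splitOn.go [','] fuel s cur acc = acc.reverse ++ pvModel s cur := by
  induction fuel with
  | zero =>
    intro s cur acc h
    have hs : s = [] := List.eq_nil_of_length_eq_zero (Nat.le_zero.mp h)
    subst hs
    simp [PySem.Chars.splitOn.go, pvModel]
  | succ n ih =>
    intro s cur acc h
    cases s with
    | nil => simp [PySem.Chars.splitOn.go, pvModel]
    | cons c rest =>
      have hlen : rest.length ≤ n := by simpa using Nat.le_of_succ_le_succ h
      have hpre : List.isPrefixOf [','] (c :: rest) = (c == ',') := by
        simp [List.isPrefixOf, eq_comm]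
      simp only [PySem.Chars.splitOn.go, hpre]
      by_cases hc : c = ','
      · subst hc
        simp only [BEq.rfl, if_pos]
        have hdrop : List.drop [','].length (',' :: rest) = rest := rfl
        rw [hdrop, ih _ _ _ hlen]
        simp [pvModel]
      · rw [if_neg (by simp [hc])]
        rw [ih _ _ _ hlen]
        simp [pvModel, hc]

theorem pvSplitOn_eq_model (s : List Char) :
    PySem.Chars.splitOn s [','] = pvModel s [] := by
  unfold PySem.Chars.splitOn
  rw [pvGo_eq _ _ _ _ (by omega)]
  simp

-- the stripped/filtered value both programs produce from a list of raw parts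
def pvF (parts : List (List Char)) : List String :=
  ((parts.map PySem.Chars.strip).filter (fun p => p ≠ [])).map String.ofList

theorem pvF_append (a b : List (List Char)) : pvF (a ++ b) = pvF a ++ pvF b := by
  simp [pvF]

-- A's inner loop produces acc ++ pvF parts
theorem pvInner (parts : List (List Char)) : ∀ (acc : List String),
    parts.foldl (fun attrs part =>
      let part := PySem.Chars.strip part
      if ¬ part.isEmpty then attrs ++ [String.ofList part] else attrs) acc
    = acc ++ pvF parts := by
  induction parts with
  | nil => intro acc; simp [pvF]
  | cons p rest ih =>
    intro acc
    rw [List.foldl_cons]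
    by_cases hp : PySem.Chars.strip p = []
    · rw [show (let part := PySem.Chars.strip p;
        if ¬ part.isEmpty then acc ++ [String.ofList part] else acc) = acc from by simp [hp]]
      rw [ih]
      simp [pvF, hp]
    · rw [show (let part := PySem.Chars.strip p;
        if ¬ part.isEmpty then acc ++ [String.ofList part] else acc)
          = acc ++ [String.ofList (PySem.Chars.strip p)] from by simp [List.isEmpty_iff, hp]]
      rw [ih]
      simp [pvF, hp]

-- A's whole accumulation equals pvF of the flattened splits
theorem pvOuter (vs : List String) : ∀ (acc : List String),
    vs.foldl (fun attrs item =>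
      (PySem.Chars.splitOn item.toList [',']).foldl (fun attrs part =>
        let part := PySem.Chars.strip part
        if ¬ part.isEmpty then attrs ++ [String.ofList part] else attrs) attrs) acc
    = acc ++ pvF (vs.flatMap (fun v => PySem.Chars.splitOn v.toList [','])) := by
  induction vs with
  | nil => intro acc; simp [pvF]
  | cons v rest ih =>
    intro acc
    simp only [List.foldl, List.flatMap_cons]
    rw [pvInner, ih, pvF_append, List.append_assoc]

-- a flush equals pvF on the single buffered part
theorem pvFlush_eq (attrs : List String) (buf : List Char) :
    pvFlush attrs buf = attrs ++ pvF [buf] := by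
  have h : pvFlush attrs buf
      = if ¬ (PySem.Chars.strip buf).isEmpty then attrs ++ [String.ofList (PySem.Chars.strip buf)]
        else attrs := rfl
  rw [h]
  by_cases hp : PySem.Chars.strip buf = []
  · simp [pvF, hp]
  · simp [pvF, hp, List.isEmpty_iff]

-- B's character machine on one item (with the sentinel comma) flushes exactly the
-- comma-separated parts of the item: acc ++ pvF (pvModel s buf.reverse)
theorem pvMachine : ∀ (s : List Char) (acc : List String) (buf : List Char),
    ((s ++ [',']).foldl pvStep (acc, buf)).1 = acc ++ pvF (pvModel s buf.reverse) := by
  intro s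
  induction s with
  | nil =>
    intro acc buf
    simp [pvStep, pvFlush_eq, pvModel]
  | cons c rest ih =>
    intro acc buf
    by_cases hc : c = ','
    · subst hc
      simp only [List.cons_append, List.foldl_cons]
      rw [show pvStep (acc, buf) ',' = (pvFlush acc buf, []) from by simp [pvStep]]
      rw [ih, pvFlush_eq, List.append_assoc, ← pvF_append]
      simp [pvModel]
    · simp only [List.cons_append, List.foldl_cons]
      rw [show pvStep (acc, buf) c = (acc, buf ++ [c]) from by simp [pvStep, hc]]
      rw [ih]
      simp [pvModel, hc]

-- B's whole accumulation equals pvF of the flattened splits (same as A's)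
theorem pvOuterB (vs : List String) : ∀ (acc : List String),
    vs.foldl (fun attrs item => ((item.toList ++ [',']).foldl pvStep (attrs, [])).1) acc
    = acc ++ pvF (vs.flatMap (fun v => PySem.Chars.splitOn v.toList [','])) := by
  induction vs with
  | nil => intro acc; simp [pvF]
  | cons v rest ih =>
    intro acc
    simp only [List.foldl, List.flatMap_cons]
    rw [pvMachine, ih, pvF_append, List.append_assoc]
    simp [pvSplitOn_eq_model]

-- ===== VERDICT (by name: the statement is the Claim_ definition above) =====
theorem expand_attributes_py_spec : Claim_equal_expand_attributes_py := by
  intro values _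
  unfold Spec_expand_attributes_py expand_attributes_py expand_attributes_py_alt
  cases values with
  | none => rfl
  | some vs =>
    cases vs with
    | nil => rfl
    | cons v rest =>
      simp only [List.isEmpty_cons]
      rw [pvOuter, pvOuterB]
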